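-- pv_equiv track=rewrite | github.com/NaNdalal-dev/hacker-rank-problems | programs/inv_slice.py | inverse_slice
-- ===== SOURCE A (Python) =====
-- def inverse_slice(items, a, b):
-- 	i = a
-- 	index = 0
-- 	new_arr = []
-- 	for value in items:
-- 		if i == index and i<b :
-- 			i += 1
-- 		else:
-- 			new_arr.append(items[index])
-- 		index += 1
-- 	return new_arr
-- ===== SOURCE B (Python) =====
-- def inverse_slice(items, a, b):
--     if a < 0 or a >= b:
--         return items[:]
--     return items[:a] + items[b:]
-- ===== Notes on version B (the rewrite author's own statement) =====
-- stated objective: simpler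
-- what changed: Replaces A's per-element pointer/counter loop with two slice operations: items[:a] + items[b:] when 0 <= a < b, and a plain copy when the drop range is empty (a < 0 or a >= b), matching A's behaviour there.
import Mathlib
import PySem

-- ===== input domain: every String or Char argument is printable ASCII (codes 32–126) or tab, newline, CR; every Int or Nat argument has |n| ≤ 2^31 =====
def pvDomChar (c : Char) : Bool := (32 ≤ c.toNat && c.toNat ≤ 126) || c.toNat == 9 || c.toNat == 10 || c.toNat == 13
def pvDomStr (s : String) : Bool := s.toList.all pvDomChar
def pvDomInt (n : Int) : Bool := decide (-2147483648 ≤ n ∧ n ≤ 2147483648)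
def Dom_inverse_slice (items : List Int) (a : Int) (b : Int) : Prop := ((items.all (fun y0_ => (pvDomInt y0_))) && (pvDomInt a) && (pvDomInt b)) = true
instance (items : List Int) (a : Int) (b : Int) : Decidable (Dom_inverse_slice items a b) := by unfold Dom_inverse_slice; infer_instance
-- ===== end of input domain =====

-- B replaces A's element-by-element pointer/counter loop with two slice
-- operations concatenated, items[:a] + items[b:] (no per-element loop at all);
-- objective: simpler.

-- ===== PORT A =====
-- A's for-loop as structural recursion over the SAME state (i, index, new_arr);
-- items[index]: index is the loop counter, always in range, so .getD 0 is exact.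
def pyALoop (items : List Int) (b : Int) : List Int → Int → Int → List Int → List Int
  | [], _, _, arr => arr
  | _value :: rest, i, index, arr =>
    if i = index ∧ i < b then
      pyALoop items b rest (i + 1) (index + 1) arr
    else
      pyALoop items b rest i (index + 1) (arr ++ [(PySem.List.pyGet? items index).getD 0])

def inverse_slice (items : List Int) (a : Int) (b : Int) : List Int :=
  pyALoop items b items a 0 []

-- ===== PORT B =====
-- if a < 0 or a >= b: return items[:]  else: return items[:a] + items[b:]
def inverse_slice_alt (items : List Int) (a : Int) (b : Int) : List Int :=
  if a < 0 ∨ b ≤ a then items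
  else PySem.List.slice items none (some a) ++ PySem.List.slice items (some b) none

-- ===== PRECONDITION & SPEC =====
def Spec_inverse_slice (items : List Int) (a : Int) (b : Int) (out : List Int) : Prop := out = inverse_slice_alt items a b
instance (items : List Int) (a : Int) (b : Int) (out : List Int) : Decidable (Spec_inverse_slice items a b out) := by unfold Spec_inverse_slice; infer_instance

-- ===== CLAIM =====
def Claim_equal_inverse_slice : Prop := ∀ (items : List Int) (a : Int) (b : Int), Dom_inverse_slice items a b → Spec_inverse_slice items a b (inverse_slice items a b)

-- ===== LEMMAS AND PROOFS =====

-- characterisation of A's loop result: keep xs's element at global position n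
-- unless 0 ≤ a ∧ a ≤ n < b
def keepFilt (a b : Int) : List Int → Int → List Int
  | [], _ => []
  | v :: rest, n =>
    if 0 ≤ a ∧ a ≤ n ∧ n < b then keepFilt a b rest (n + 1)
    else v :: keepFilt a b rest (n + 1)

theorem pyALoop_eq_keepFilt (items : List Int) (a b : Int) :
    ∀ (rest : List Int) (n i : Int) (arr : List Int),
      0 ≤ n → items.drop n.toNat = rest →
      i = (if 0 ≤ a then max a (min n b) else a) →
      pyALoop items b rest i n arr = arr ++ keepFilt a b rest n := by
  intro rest
  induction rest with
  | nil => intro n i arr _ _ _; simp [pyALoop, keepFilt]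
  | cons v rest ih =>
    intro n i arr hn hdrop hi
    have hlen : n.toNat < items.length := by
      by_contra h
      simp [List.drop_eq_nil_of_le (Nat.le_of_not_lt h)] at hdrop
    have h0 : items[n.toNat]? = some v := by
      have h2 : (items.drop n.toNat)[0]? = items[n.toNat + 0]? := List.getElem?_drop
      rw [hdrop] at h2; simpa using h2.symm
    have hv : items[n.toNat] = v := by
      simpa [List.getElem?_eq_getElem hlen] using h0
    have hget : (PySem.List.pyGet? items n).getD 0 = v := by
      have hlt : n < (items.length : Int) := by omega
      simp [PySem.List.pyGet?, PySem.List.pyIdx?, hn, hlt, hv]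
    have hdrop' : items.drop (n + 1).toNat = rest := by
      rw [show (n + 1).toNat = n.toNat + 1 by omega, ← List.tail_drop, hdrop]
      rfl
    simp only [pyALoop, keepFilt]
    by_cases ha : 0 ≤ a
    · rw [if_pos ha] at hi
      by_cases hc : a ≤ n ∧ n < b
      · rw [if_pos (by omega : i = n ∧ i < b), if_pos ⟨ha, hc.1, hc.2⟩]
        exact ih (n + 1) (i + 1) arr (by omega) hdrop' (by rw [if_pos ha]; omega)
      · rw [if_neg (by omega : ¬(i = n ∧ i < b)), if_neg (by omega : ¬(0 ≤ a ∧ a ≤ n ∧ n < b)), hget]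
        rw [ih (n + 1) i (arr ++ [v]) (by omega) hdrop' (by rw [if_pos ha]; omega)]
        simp
    · rw [if_neg ha] at hi
      rw [if_neg (by omega : ¬(i = n ∧ i < b)), if_neg (by omega : ¬(0 ≤ a ∧ a ≤ n ∧ n < b)), hget]
      rw [ih (n + 1) i (arr ++ [v]) (by omega) hdrop' (by rw [if_neg ha]; exact hi)]
      simp

-- when the drop range is empty (a < 0 or b ≤ a), nothing is removed
theorem keepFilt_id (a b : Int) (h : a < 0 ∨ b ≤ a) :
    ∀ (xs : List Int) (n : Int), keepFilt a b xs n = xs := by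
  intro xs
  induction xs with
  | nil => intro n; simp [keepFilt]
  | cons v rest ih =>
    intro n
    rw [keepFilt, if_neg (by omega : ¬(0 ≤ a ∧ a ≤ n ∧ n < b)), ih (n + 1)]

-- when 0 ≤ a < b, the kept elements are take ++ drop
theorem keepFilt_take_drop (a b : Int) (ha : 0 ≤ a) (hab : a < b) :
    ∀ (xs : List Int) (n : Int), 0 ≤ n →
      keepFilt a b xs n = xs.take (a - n).toNat ++ xs.drop (b - n).toNat := by
  intro xs
  induction xs with
  | nil => intro n _; simp [keepFilt]
  | cons v rest ih =>
    intro n hn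
    rw [keepFilt]
    by_cases hc : a ≤ n ∧ n < b
    · rw [if_pos ⟨ha, hc.1, hc.2⟩, ih (n + 1) (by omega)]
      rw [show (a - n).toNat = 0 by omega, show (b - n).toNat = (b - (n+1)).toNat + 1 by omega,
          show (a - (n+1)).toNat = 0 by omega]
      simp
    · rw [if_neg (by tauto), ih (n + 1) (by omega)]
      by_cases hna : n < a
      · rw [show (a - n).toNat = (a - (n+1)).toNat + 1 by omega,
            show (b - n).toNat = (b - (n+1)).toNat + 1 by omega]
        simp
      · have hnb : b ≤ n := by omega
        rw [show (a - n).toNat = 0 by omega, show (b - n).toNat = 0 by omega,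
            show (a - (n+1)).toNat = 0 by omega, show (b - (n+1)).toNat = 0 by omega]
        simp

-- ===== VERDICT =====
theorem inverse_slice_spec : Claim_equal_inverse_slice := by
  intro items a b _
  unfold Spec_inverse_slice inverse_slice inverse_slice_alt
  rw [pyALoop_eq_keepFilt items a b items 0 a [] (by omega) (by simp)
    (by by_cases h : 0 ≤ a
        · rw [if_pos h]; omega
        · rw [if_neg h])]
  by_cases h : a < 0 ∨ b ≤ a
  · rw [if_pos h, keepFilt_id a b h items 0]; simp
  · rw [if_neg h]
    rw [keepFilt_take_drop a b (by omega) (by omega) items 0 le_rfl]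
    rw [PySem.List.slice_to items (by omega : (0:Int) ≤ a), PySem.List.slice_from items (by omega : (0:Int) ≤ b)]
    simp
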